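-- pv_equiv track=rewrite | github.com/bakurits/Programming-Paradigms | Assignments/Assignment-8/assn-8-align/align.py | findOptimalAlignment
-- ===== SOURCE A (Python) =====
-- def findOptimalAlignment(strand1, strand2, cache):
--     # if one of the two strands is empty, then there is only
--     # one possible alignment, and of course it's optimal
--     if len(strand1) == 0: return len(strand2) * -2, None
--     if len(strand2) == 0: return len(strand1) * -2, None
--     if strand1 + "#" + strand2 in cache.keys(): return cache[strand1 + "#" + strand2]
--
--     ans = None, None
--     # There's the scenario where the two leading bases of
--     # each strand are forced to align, regardless of whether or not
--     # they actually match.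
--     bestWith = findOptimalAlignment(strand1[1:], strand2[1:], cache)[0]
--     if strand1[0] == strand2[0]:
--         ans = (bestWith + 1, 0)
--         cache[strand1 + "#" + strand2] = ans
--         return ans  # no benefit from making other recursive calls
--
--     best = bestWith - 1
--     ans = (best, 0)
--
--     # It's possible that the leading base of strand1 best
--     # matches not the leading base of strand2, but the one after it.
--     bestWithout = findOptimalAlignment(strand1, strand2[1:], cache)[0]
--     bestWithout -= 2  # penalize for insertion of space
--     if bestWithout > best:
--         best = bestWithout
--         ans = (best, 1)
--
--     # opposite scenario
--     bestWithout = findOptimalAlignment(strand1[1:], strand2, cache)[0]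
--     bestWithout -= 2  # penalize for insertion of space
--     if bestWithout > best:
--         best = bestWithout
--         ans = (best, -1)
--
--     cache[strand1 + "#" + strand2] = ans
--     return ans
-- ===== SOURCE B (Python) =====
-- def findOptimalAlignment(strand1, strand2, cache):
--     # Bottom-up dynamic programming over suffix indices: one (m+1)-wide row per
--     # position of strand1, filled right to left.  The memoization dict `cache`
--     # is unnecessary for a bottom-up table and is left untouched.
--     n, m = len(strand1), len(strand2)
--     row = [(-2 * (m - j), None) for j in range(m + 1)]
--     for i in range(n - 1, -1, -1):
--         new = [(-2 * (n - i), None)]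
--         for j in range(m - 1, -1, -1):
--             if strand1[i] == strand2[j]:
--                 cell = (row[j + 1][0] + 1, 0)
--             else:
--                 best, mv = row[j + 1][0] - 1, 0
--                 if new[0][0] - 2 > best:
--                     best, mv = new[0][0] - 2, 1
--                 if row[j][0] - 2 > best:
--                     best, mv = row[j][0] - 2, -1
--                 cell = (best, mv)
--             new = [cell] + new
--         row = new
--     return row[0]
-- ===== Notes on version B (the rewrite author's own statement) =====
-- stated objective: faster
-- what changed: Replaces A's memoized top-down recursion over string slices (building a 'suf1#suf2' key per subproblem) with an iterative bottom-up DP over integer suffix indices that keeps one row at a time; the memo dict is not needed and is left untouched (A mutates it; equivalence is about the return value only). Pre_ excludes strands whose nonempty suffix pairs are ambiguous, i.e. …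
-- outside the precondition, e.g. on findOptimalAlignment('A###', '##A', {}): A returns (-3, 0), B returns (-1, -1); on findOptimalAlignment('GC', 'A', {'C#A': (3, 0)}): A returns (1, -1), B returns (-3, 0)
import Mathlib
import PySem

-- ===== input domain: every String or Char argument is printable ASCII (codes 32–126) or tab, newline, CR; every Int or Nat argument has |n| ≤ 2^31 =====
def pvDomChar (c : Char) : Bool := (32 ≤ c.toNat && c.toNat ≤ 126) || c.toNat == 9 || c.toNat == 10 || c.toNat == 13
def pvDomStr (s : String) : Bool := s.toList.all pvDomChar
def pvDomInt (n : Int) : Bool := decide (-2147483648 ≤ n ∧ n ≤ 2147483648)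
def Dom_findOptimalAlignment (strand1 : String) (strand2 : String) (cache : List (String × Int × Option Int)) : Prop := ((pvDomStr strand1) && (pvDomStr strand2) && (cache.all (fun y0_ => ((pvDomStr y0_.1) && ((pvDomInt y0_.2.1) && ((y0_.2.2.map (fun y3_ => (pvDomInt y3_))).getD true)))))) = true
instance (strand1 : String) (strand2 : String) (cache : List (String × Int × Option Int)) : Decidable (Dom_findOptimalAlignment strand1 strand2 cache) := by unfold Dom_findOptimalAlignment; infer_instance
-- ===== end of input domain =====

-- B replaces A's memoized top-down recursion (quadratic-many string keys, each of linear
-- length) by a bottom-up DP over integer suffix indices; objective: faster. A mutates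
-- `cache` (fills it as a memo table) while B does not touch it: the equivalence proved
-- here is about the RETURN value only.

-- ===== PORT A =====
-- key `strand1 + "#" + strand2`
def pvKey (s1 s2 : List Char) : String := String.ofList (s1 ++ '#' :: s2)

-- the recursion of A, threading the mutable dict `cache` as explicit state
-- (strand1[1:] on a list of chars is List.tail, per PySem.List.slice_from_one)
def pvGoA (s1 s2 : List Char) (c : PySem.Dict String (Int × Option Int)) :
    (Int × Option Int) × PySem.Dict String (Int × Option Int) :=
  if h1 : s1.length = 0 then (((s2.length : Int) * -2, none), c)
  else if h2 : s2.length = 0 then (((s1.length : Int) * -2, none), c)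
  else
    match c.get? (pvKey s1 s2) with
    | some v => (v, c)
    | none =>
      let r1 := pvGoA s1.tail s2.tail c                     -- strand1[1:], strand2[1:]
      let bestWith := r1.1.1
      if PySem.List.pyGet? s1 0 = PySem.List.pyGet? s2 0 then  -- strand1[0] == strand2[0]
        let ans : Int × Option Int := (bestWith + 1, some 0)
        (ans, r1.2.insert (pvKey s1 s2) ans)
      else
        let best := bestWith - 1
        let r2 := pvGoA s1 s2.tail r1.2                     -- strand1, strand2[1:]
        let bestWithout := r2.1.1 - 2
        let p1 := if bestWithout > best then (bestWithout, ((bestWithout, some 1) : Int × Option Int))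
                  else (best, ((best, some 0) : Int × Option Int))
        let r3 := pvGoA s1.tail s2 r2.2                     -- strand1[1:], strand2
        let bestWithout2 := r3.1.1 - 2
        let ans := if bestWithout2 > p1.1 then ((bestWithout2, some (-1)) : Int × Option Int) else p1.2
        (ans, r3.2.insert (pvKey s1 s2) ans)
termination_by s1.length + s2.length
decreasing_by all_goals simp [List.length_tail]; omega

def findOptimalAlignment (strand1 : String) (strand2 : String) (cache : List (String × Int × Option Int)) : Int × Option Int :=
  (pvGoA strand1.toList strand2.toList (PySem.Dict.mk cache)).1

-- ===== PORT B =====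
-- one cell of the DP table; `row` is the finished row i+1, `new` the cells (i, j+1 .. m)
def pvCellB (s1 s2 : List Char) (row new : List (Int × Option Int)) (i j : Int) : Int × Option Int :=
  if PySem.List.pyGet? s1 i = PySem.List.pyGet? s2 j then       -- strand1[i] == strand2[j]
    ((PySem.List.pyGetD row (j + 1) (0, none)).1 + 1, some 0)
  else
    let best := (PySem.List.pyGetD row (j + 1) (0, none)).1 - 1
    let p := if (PySem.List.pyGetD new 0 (0, none)).1 - 2 > best
             then ((PySem.List.pyGetD new 0 (0, none)).1 - 2, (some 1 : Option Int))
             else (best, (some 0 : Option Int))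
    if (PySem.List.pyGetD row j (0, none)).1 - 2 > p.1
    then ((PySem.List.pyGetD row j (0, none)).1 - 2, some (-1)) else p

-- the inner j-loop: new = [(-2*(n-i), None)]; for j in range(m-1,-1,-1): new = [cell] + new
def pvRowB (s1 s2 : List Char) (row : List (Int × Option Int)) (i : Int) : List (Int × Option Int) :=
  (PySem.List.pyRange ((s2.length : Int) - 1) (-1) (-1)).foldl
    (fun new j => pvCellB s1 s2 row new i j :: new)
    [(-2 * ((s1.length : Int) - i), none)]

def findOptimalAlignment_alt (strand1 : String) (strand2 : String) (cache : List (String × Int × Option Int)) : Int × Option Int :=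
  let l1 := strand1.toList
  let l2 := strand2.toList
  let n : Int := l1.length
  let m : Int := l2.length
  let row0 := (PySem.List.pyRange 0 (m + 1) 1).map (fun j => ((-2 * (m - j), none) : Int × Option Int))
  let rowFin := (PySem.List.pyRange (n - 1) (-1) (-1)).foldl (fun row i => pvRowB l1 l2 row i) row0
  PySem.List.pyGetD rowFin 0 (0, none)                          -- row[0]

-- ===== PRECONDITION & SPEC =====
-- Pre_ excludes (a) strands whose suffix pairs are ambiguous: two distinct nonempty
-- suffix pairs share the memo key "suf1#suf2", so A's value is an accident of which
-- colliding subproblem its cache hits first; and (b) caches pre-seeded with a key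
-- encoding a nonempty suffix pair of the strands: there A returns whatever value the
-- caller stuffed in instead of an alignment score, an artefact of its memoization.
def Pre_findOptimalAlignment (strand1 : String) (strand2 : String) (cache : List (String × Int × Option Int)) : Prop :=
  (∀ t1 ∈ strand1.toList.tails, ∀ t2 ∈ strand2.toList.tails,
   ∀ u1 ∈ strand1.toList.tails, ∀ u2 ∈ strand2.toList.tails,
     t1 ≠ [] → t2 ≠ [] → u1 ≠ [] → u2 ≠ [] →
     String.ofList (t1 ++ '#' :: t2) = String.ofList (u1 ++ '#' :: u2) → t1 = u1 ∧ t2 = u2) ∧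
  ∀ kv ∈ cache, ∀ t1 ∈ strand1.toList.tails, ∀ t2 ∈ strand2.toList.tails,
    t1 = [] ∨ t2 = [] ∨ kv.1 ≠ String.ofList (t1 ++ '#' :: t2)
instance (strand1 : String) (strand2 : String) (cache : List (String × Int × Option Int)) : Decidable (Pre_findOptimalAlignment strand1 strand2 cache) := by unfold Pre_findOptimalAlignment; infer_instance
def pvWitness_findOptimalAlignment : String × String × (List (String × Int × Option Int)) :=
  ("GAC", "CA", [("TT", 3, some 0)])
def Spec_findOptimalAlignment (strand1 : String) (strand2 : String) (cache : List (String × Int × Option Int)) (out : Int × Option Int) : Prop := out = findOptimalAlignment_alt strand1 strand2 cache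
instance (strand1 : String) (strand2 : String) (cache : List (String × Int × Option Int)) (out : Int × Option Int) : Decidable (Spec_findOptimalAlignment strand1 strand2 cache out) := by unfold Spec_findOptimalAlignment; infer_instance

-- ===== CLAIM (what is proved, stated in full; the proofs are below) =====
def Claim_equal_findOptimalAlignment : Prop := ∀ (strand1 : String) (strand2 : String) (cache : List (String × Int × Option Int)), Dom_findOptimalAlignment strand1 strand2 cache → Pre_findOptimalAlignment strand1 strand2 cache → Spec_findOptimalAlignment strand1 strand2 cache (findOptimalAlignment strand1 strand2 cache)

-- ===== LEMMAS AND PROOFS =====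

-- the mathematical alignment recursion both programs compute
def pvScore : List Char → List Char → Int × Option Int
  | [], s2 => ((s2.length : Int) * -2, none)
  | s1@(_ :: _), [] => ((s1.length : Int) * -2, none)
  | a :: t1, b :: t2 =>
    let bw := (pvScore t1 t2).1
    if a = b then (bw + 1, some 0)
    else
      let best := bw - 1
      let b1 := (pvScore (a :: t1) t2).1 - 2
      let p := if b1 > best then (b1, (some 1 : Option Int)) else (best, (some 0 : Option Int))
      let b2 := (pvScore t1 (b :: t2)).1 - 2
      if b2 > p.1 then (b2, some (-1)) else p
termination_by s1 s2 => s1.length + s2.length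
decreasing_by all_goals simp; try omega

-- invariant of A's evolving cache
def pvInv (S1 S2 : List Char) (c : PySem.Dict String (Int × Option Int)) : Prop :=
  ∀ t1 t2 v, t1 <:+ S1 → t2 <:+ S2 → t1 ≠ [] → t2 ≠ [] →
    c.get? (pvKey t1 t2) = some v → v = pvScore t1 t2

-- unambiguous memo keys among nonempty suffix pairs of (S1, S2)
def pvInj (S1 S2 : List Char) : Prop :=
  ∀ t1 t2 u1 u2 : List Char, t1 <:+ S1 → t2 <:+ S2 → u1 <:+ S1 → u2 <:+ S2 →
    t1 ≠ [] → t2 ≠ [] → u1 ≠ [] → u2 ≠ [] → pvKey t1 t2 = pvKey u1 u2 → t1 = u1 ∧ t2 = u2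

lemma pvInv_insert (S1 S2 : List Char) (hinj : pvInj S1 S2)
    {s1 s2 : List Char} (hs1 : s1 <:+ S1) (hs2 : s2 <:+ S2) (hm1 : s1 ≠ []) (hm2 : s2 ≠ [])
    {c : PySem.Dict String (Int × Option Int)} (hinv : pvInv S1 S2 c)
    {ans : Int × Option Int} (hans : ans = pvScore s1 s2) :
    pvInv S1 S2 (c.insert (pvKey s1 s2) ans) := by
  intro t1 t2 v ht1 ht2 hn1 hn2 hget
  rw [PySem.Dict.get?_insert] at hget
  by_cases hk : pvKey t1 t2 = pvKey s1 s2
  · obtain ⟨rfl, rfl⟩ := hinj t1 t2 s1 s2 ht1 ht2 hs1 hs2 hn1 hn2 hm1 hm2 hk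
    rw [if_pos hk] at hget
    rw [← Option.some_inj.mp hget, hans]
  · rw [if_neg hk] at hget
    exact hinv t1 t2 v ht1 ht2 hn1 hn2 hget

lemma pvGoA_correct (S1 S2 : List Char) (hinj : pvInj S1 S2) :
    ∀ (N : ℕ) (s1 s2 : List Char) (c : PySem.Dict String (Int × Option Int)),
      s1.length + s2.length ≤ N → s1 <:+ S1 → s2 <:+ S2 → pvInv S1 S2 c →
      (pvGoA s1 s2 c).1 = pvScore s1 s2 ∧ pvInv S1 S2 (pvGoA s1 s2 c).2 := by
  intro N
  induction N with
  | zero =>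
    intro s1 s2 c hN hs1 hs2 hinv
    have hz : s1.length = 0 := by omega
    obtain rfl := List.length_eq_zero_iff.mp hz
    rw [pvGoA]
    simp [pvScore, hinv]
  | succ N ih =>
    intro s1 s2 c hN hs1 hs2 hinv
    match s1, s2 with
    | [], s2 =>
      rw [pvGoA]
      simp [pvScore, hinv]
    | a :: t1, [] =>
      rw [pvGoA]
      simp [pvScore, hinv]
    | a :: t1, b :: t2 =>
      have ht1 : t1 <:+ S1 := (List.tail_suffix (a :: t1)).trans hs1
      have ht2 : t2 <:+ S2 := (List.tail_suffix (b :: t2)).trans hs2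
      have hnum : (a :: t1).length + t2.length ≤ N ∧ t1.length + (b :: t2).length ≤ N ∧
          t1.length + t2.length ≤ N := by simp at hN ⊢; omega
      rw [pvGoA]
      simp only [List.length_cons, List.tail_cons]
      cases hg : c.get? (pvKey (a :: t1) (b :: t2)) with
      | some v =>
        simp only [Nat.succ_ne_zero, dite_false, hg]
        exact ⟨hinv _ _ v hs1 hs2 (List.cons_ne_nil a t1) (List.cons_ne_nil b t2) hg, hinv⟩
      | none =>
        simp only [Nat.succ_ne_zero, dite_false, hg]
        obtain ⟨hr1, hc1⟩ := ih t1 t2 c hnum.2.2 ht1 ht2 hinv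
        by_cases hab : a = b
        · have hcmp : PySem.List.pyGet? (a :: t1) (0 : Int) = PySem.List.pyGet? (b :: t2) (0 : Int) := by
            simp [PySem.List.pyGet?, PySem.List.pyIdx?, hab]
          simp only [hcmp, if_true, List.tail_cons]
          have hval : ((pvGoA t1 t2 c).1.1 + 1, (some 0 : Option Int)) = pvScore (a :: t1) (b :: t2) := by
            rw [pvScore]; simp [hab, hr1]
          exact ⟨hval, pvInv_insert S1 S2 hinj hs1 hs2 (List.cons_ne_nil a t1) (List.cons_ne_nil b t2) hc1 hval⟩
        · have hcmp : ¬ (PySem.List.pyGet? (a :: t1) (0 : Int) = PySem.List.pyGet? (b :: t2) (0 : Int)) := by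
            simp [PySem.List.pyGet?, PySem.List.pyIdx?, hab]
          simp only [hcmp, if_false, List.tail_cons]
          obtain ⟨hr2, hc2⟩ := ih (a :: t1) t2 (pvGoA t1 t2 c).2 hnum.1 hs1 ht2 hc1
          obtain ⟨hr3, hc3⟩ := ih t1 (b :: t2) (pvGoA (a :: t1) t2 (pvGoA t1 t2 c).2).2 hnum.2.1 ht1 hs2 hc2
          have hval : (if (pvGoA t1 (b :: t2) (pvGoA (a :: t1) t2 (pvGoA t1 t2 c).2).2).1.1 - 2 >
                (if (pvGoA (a :: t1) t2 (pvGoA t1 t2 c).2).1.1 - 2 > (pvGoA t1 t2 c).1.1 - 1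
                 then ((pvGoA (a :: t1) t2 (pvGoA t1 t2 c).2).1.1 - 2, ((pvGoA (a :: t1) t2 (pvGoA t1 t2 c).2).1.1 - 2, (some 1 : Option Int)))
                 else ((pvGoA t1 t2 c).1.1 - 1, ((pvGoA t1 t2 c).1.1 - 1, (some 0 : Option Int)))).1
              then ((pvGoA t1 (b :: t2) (pvGoA (a :: t1) t2 (pvGoA t1 t2 c).2).2).1.1 - 2, (some (-1) : Option Int))
              else (if (pvGoA (a :: t1) t2 (pvGoA t1 t2 c).2).1.1 - 2 > (pvGoA t1 t2 c).1.1 - 1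
                 then ((pvGoA (a :: t1) t2 (pvGoA t1 t2 c).2).1.1 - 2, ((pvGoA (a :: t1) t2 (pvGoA t1 t2 c).2).1.1 - 2, (some 1 : Option Int)))
                 else ((pvGoA t1 t2 c).1.1 - 1, ((pvGoA t1 t2 c).1.1 - 1, (some 0 : Option Int)))).2)
              = pvScore (a :: t1) (b :: t2) := by
            rw [pvScore]
            simp only [hab, if_false, hr1, hr2, hr3]
            split_ifs <;> simp_all <;> omega
          refine ⟨by exact hval, pvInv_insert S1 S2 hinj hs1 hs2 (List.cons_ne_nil a t1) (List.cons_ne_nil b t2) hc3 hval⟩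

-- B's rows: pvCells i j = [score(i,j), score(i,j+1), …, score(i,m)]
def pvCells (l1 l2 : List Char) (i j : ℕ) : List (Int × Option Int) :=
  (List.range (l2.length + 1 - j)).map (fun k => pvScore (l1.drop i) (l2.drop (j + k)))

lemma pvCells_cons (l1 l2 : List Char) (i j : ℕ) (hj : j ≤ l2.length) :
    pvCells l1 l2 i j = pvScore (l1.drop i) (l2.drop j) :: pvCells l1 l2 i (j + 1) := by
  unfold pvCells
  have : l2.length + 1 - j = (l2.length - j) + 1 := by omega
  rw [this]
  rw [List.range_succ_eq_map]
  simp [List.map_map, Function.comp]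
  intro k _
  have hk : j + (k + 1) = j + 1 + k := by omega
  rw [hk]

lemma pvCells_getD (l1 l2 : List Char) (i j k : ℕ) (hk : k < l2.length + 1 - j)
    (d : Int × Option Int) :
    (pvCells l1 l2 i j).getD k d = pvScore (l1.drop i) (l2.drop (j + k)) := by
  unfold pvCells
  rw [PySem.List.getD_map_range _ _ _ _ hk]

lemma pvCellB_correct (l1 l2 : List Char) (i j : ℕ) (hi : i < l1.length) (hj : j < l2.length) :
    pvCellB l1 l2 (pvCells l1 l2 (i + 1) 0) (pvCells l1 l2 i (j + 1)) (i : Int) (j : Int) =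
      pvScore (l1.drop i) (l2.drop j) := by
  have hL1 : l1.drop i = l1[i] :: l1.drop (i + 1) := List.drop_eq_getElem_cons hi
  have hL2 : l2.drop j = l2[j] :: l2.drop (j + 1) := List.drop_eq_getElem_cons hj
  unfold pvCellB
  rw [show ((j : Int) + 1) = (((j + 1 : ℕ)) : Int) by push_cast; ring]
  rw [PySem.List.pyGet?_natCast, PySem.List.pyGet?_natCast]
  simp only [PySem.List.pyGetD_natCast, PySem.List.pyGetD_zero]
  rw [pvCells_getD l1 l2 (i + 1) 0 (j + 1) (by omega), pvCells_getD l1 l2 i (j + 1) 0 (by omega),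
      pvCells_getD l1 l2 (i + 1) 0 j (by omega)]
  rw [List.getElem?_eq_getElem hi, List.getElem?_eq_getElem hj]
  rw [hL1, hL2, pvScore]
  simp only [Nat.zero_add, Nat.add_zero, List.drop_zero, Option.some.injEq]
  by_cases hab : l1[i] = l2[j]
  · simp [hab]
  · simp only [hab, if_false]
    split_ifs <;> simp_all <;> omega

lemma pvRowB_correct (l1 l2 : List Char) (i : ℕ) (hi : i < l1.length) :
    pvRowB l1 l2 (pvCells l1 l2 (i + 1) 0) (i : Int) = pvCells l1 l2 i 0 := by
  have base : [((-2 * ((l1.length : Int) - (i : Int)), none) : Int × Option Int)] =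
      pvCells l1 l2 i l2.length := by
    have hd : l1.drop i = l1[i] :: l1.drop (i + 1) := List.drop_eq_getElem_cons hi
    unfold pvCells
    rw [show l2.length + 1 - l2.length = 1 by omega]
    simp only [List.range_one, List.map_cons, List.map_nil, Nat.add_zero, List.drop_length]
    rw [hd, pvScore]
    simp only [List.cons.injEq, Prod.mk.injEq, and_true]
    rw [← hd, List.length_drop]
    push_cast [Nat.cast_sub (le_of_lt hi)]
    ring
  have inner : ∀ (j : ℕ), j ≤ l2.length →
      (PySem.List.pyRange ((j : Int) - 1) (-1) (-1)).foldl
        (fun new j' => pvCellB l1 l2 (pvCells l1 l2 (i + 1) 0) new (i : Int) j' :: new)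
        (pvCells l1 l2 i j) = pvCells l1 l2 i 0 := by
    intro j
    induction j with
    | zero =>
      intro _
      rw [PySem.List.pyRange_neg_one_eq_nil (by omega)]
      simp
    | succ j ihj =>
      intro hj
      have h1 : ((j + 1 : ℕ) : Int) - 1 = (j : Int) := by push_cast; ring
      rw [h1, PySem.List.pyRange_neg_one_cons (by omega)]
      rw [List.foldl_cons]
      have hstep : pvCellB l1 l2 (pvCells l1 l2 (i + 1) 0) (pvCells l1 l2 i (j + 1)) (i : Int) (j : Int) :: pvCells l1 l2 i (j + 1) = pvCells l1 l2 i j := by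
        rw [pvCellB_correct l1 l2 i j hi (by omega)]
        exact (pvCells_cons l1 l2 i j (by omega)).symm
      have h2 : ((j : Int)) - 1 = ((j : ℕ) : Int) - 1 := rfl
      rw [hstep]
      exact ihj (by omega)
  unfold pvRowB
  rw [base]
  exact inner l2.length le_rfl

lemma pvAlt_eq (strand1 strand2 : String) (cache : List (String × Int × Option Int)) :
    findOptimalAlignment_alt strand1 strand2 cache = pvScore strand1.toList strand2.toList := by
  simp only [findOptimalAlignment_alt]
  have hrow0 : (PySem.List.pyRange 0 (((strand2.toList.length : Int)) + 1) 1).map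
      (fun j => ((-2 * ((strand2.toList.length : Int) - j), none) : Int × Option Int)) =
      pvCells strand1.toList strand2.toList strand1.toList.length 0 := by
    rw [PySem.List.pyRange_one]
    unfold pvCells
    rw [show (((strand2.toList.length : Int)) + 1 - 0).toNat = strand2.toList.length + 1 by omega]
    rw [List.map_map]
    apply List.map_congr_left
    intro k hk
    rw [List.mem_range] at hk
    simp only [Function.comp, List.drop_length, Nat.zero_add]
    rw [pvScore]
    have : (strand2.toList.drop k).length = strand2.toList.length - k := List.length_drop
    rw [this]
    simp only [Prod.mk.injEq, and_true]
    push_cast [Nat.cast_sub (by omega : k ≤ strand2.toList.length)]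
    ring
  have outer : ∀ (i : ℕ), i ≤ strand1.toList.length →
      (PySem.List.pyRange ((i : Int) - 1) (-1) (-1)).foldl
        (fun row i' => pvRowB strand1.toList strand2.toList row i')
        (pvCells strand1.toList strand2.toList i 0) =
        pvCells strand1.toList strand2.toList 0 0 := by
    intro i
    induction i with
    | zero =>
      intro _
      rw [PySem.List.pyRange_neg_one_eq_nil (by omega)]
      simp
    | succ i ihi =>
      intro hi
      rw [show ((i + 1 : ℕ) : Int) - 1 = (i : Int) by push_cast; ring]
      rw [PySem.List.pyRange_neg_one_cons (by omega), List.foldl_cons]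
      rw [pvRowB_correct strand1.toList strand2.toList i (by omega)]
      exact ihi (by omega)
  rw [hrow0, outer strand1.toList.length le_rfl]
  rw [PySem.List.pyGetD_zero, pvCells_getD _ _ 0 0 0 (by omega)]
  simp

-- ===== VERDICT (by name: the statement is the Claim_ definition above) =====
theorem findOptimalAlignment_spec : Claim_equal_findOptimalAlignment := by
  intro strand1 strand2 cache _ hpre
  obtain ⟨hinjT, hc⟩ := hpre
  have hinj : pvInj strand1.toList strand2.toList := by
    intro t1 t2 u1 u2 ht1 ht2 hu1 hu2 hn1 hn2 hm1 hm2 hk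
    exact hinjT t1 ((List.mem_tails _ _).mpr ht1) t2 ((List.mem_tails _ _).mpr ht2)
      u1 ((List.mem_tails _ _).mpr hu1) u2 ((List.mem_tails _ _).mpr hu2)
      hn1 hn2 hm1 hm2 (by simpa [pvKey] using hk)
  unfold Spec_findOptimalAlignment findOptimalAlignment
  have hInv : pvInv strand1.toList strand2.toList (PySem.Dict.mk cache) := by
    intro t1 t2 v ht1 ht2 hn1 hn2 hget
    exfalso
    have hmem : pvKey t1 t2 ∈ (PySem.Dict.mk cache).keys := by
      by_contra hnm
      rw [(PySem.Dict.get?_eq_none_iff_not_mem_keys _ _).mpr hnm] at hget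
      simp at hget
    rw [PySem.Dict.keys_mk] at hmem
    obtain ⟨kv, hkv, hk1⟩ := List.mem_map.mp hmem
    rcases hc kv hkv t1 ((List.mem_tails _ _).mpr ht1) t2 ((List.mem_tails _ _).mpr ht2) with h | h | h
    · exact hn1 h
    · exact hn2 h
    · exact h (by simpa [pvKey] using hk1)
  have := (pvGoA_correct strand1.toList strand2.toList hinj
    (strand1.toList.length + strand2.toList.length) strand1.toList strand2.toList
    (PySem.Dict.mk cache) le_rfl List.suffix_rfl List.suffix_rfl hInv).1
  rw [this, pvAlt_eq]
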